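-- pv_equiv track=rewrite | github.com/Leesuwon1254/reader_pov_app | backend/main.py | build_style
-- ===== SOURCE A (Python) =====
-- from typing import List, Optional, Literal, Dict, Any, Tuple
--
-- OPTION_ORDER = [
--     "DETAIL",
--     "EMOTION_DEEP",
--     "DIALOGUE_HEAVY",
--     "INTENSE",
--     "ADD_SIDE_CHAR",
--     "WORLD_EXPAND",
--     "TWIST",
-- ]
--
-- OPTION_TEXT = {
--     "DETAIL": "- 장면 묘사를 풍부하게(시각/청각/후각/촉각 중 최소 2개), 인물의 미세한 표정·버릇·시선 처리를 자주 넣어라.",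
--     "INTENSE": "- 갈등 강도를 높이고, 너에게 불리한 선택을 강요하는 상황을 넣어라. 단, 수위는 안전하게 유지하라.",
--     "ADD_SIDE_CHAR": "- 새 인물 1~2명을 추가 등장시키고, 전개에 기능적 역할(조력/방해/미스터리)을 부여하라.",
--     "DIALOGUE_HEAVY": "- 대화 비중을 높여라(전체 분량 중 대화 50% 이상). 대사로 긴장과 정보가 전달되게 하라.",
--     "TWIST": "- 마지막 15% 구간에 자연스러운 반전 1개를 넣어라(억지 금지). 앞부분에 복선 1개를 반드시 심어라.",
--     "EMOTION_DEEP": "- 주인공의 감정 변화가 단계적으로 느껴지도록 내적 독백과 신체 반응(호흡/심장/손끝 등)을 배치하라.",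
--     "WORLD_EXPAND": "- 세계관 단서(규칙/조직/사건의 흔적)를 1~2개 추가하되, 설명 과다는 피하고 장면 속에 녹여라.",
-- }
--
-- DEFAULT_STYLE_LINE = "- 문체는 간결하고 몰입감 있게, 장면 전환을 빠르게 하라."
--
-- def build_style(options: List[str]) -> str:
--     if not options:
--         return DEFAULT_STYLE_LINE
--     order = {k: i for i, k in enumerate(OPTION_ORDER)}
--     uniq = []
--     seen = set()
--     for o in options:
--         if o not in seen:
--             seen.add(o)
--             uniq.append(o)
--     uniq.sort(key=lambda x: order.get(x, 999))
--     lines = [OPTION_TEXT[o] for o in uniq if o in OPTION_TEXT]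
--     return "\n".join(lines) if lines else DEFAULT_STYLE_LINE
-- ===== SOURCE B (Python) =====
-- OPTION_ORDER = [
--     "DETAIL",
--     "EMOTION_DEEP",
--     "DIALOGUE_HEAVY",
--     "INTENSE",
--     "ADD_SIDE_CHAR",
--     "WORLD_EXPAND",
--     "TWIST",
-- ]
--
-- OPTION_TEXT = {
--     "DETAIL": "- 장면 묘사를 풍부하게(시각/청각/후각/촉각 중 최소 2개), 인물의 미세한 표정·버릇·시선 처리를 자주 넣어라.",
--     "INTENSE": "- 갈등 강도를 높이고, 너에게 불리한 선택을 강요하는 상황을 넣어라. 단, 수위는 안전하게 유지하라.",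
--     "ADD_SIDE_CHAR": "- 새 인물 1~2명을 추가 등장시키고, 전개에 기능적 역할(조력/방해/미스터리)을 부여하라.",
--     "DIALOGUE_HEAVY": "- 대화 비중을 높여라(전체 분량 중 대화 50% 이상). 대사로 긴장과 정보가 전달되게 하라.",
--     "TWIST": "- 마지막 15% 구간에 자연스러운 반전 1개를 넣어라(억지 금지). 앞부분에 복선 1개를 반드시 심어라.",
--     "EMOTION_DEEP": "- 주인공의 감정 변화가 단계적으로 느껴지도록 내적 독백과 신체 반응(호흡/심장/손끝 등)을 배치하라.",
--     "WORLD_EXPAND": "- 세계관 단서(규칙/조직/사건의 흔적)를 1~2개 추가하되, 설명 과다는 피하고 장면 속에 녹여라.",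
-- }
--
-- DEFAULT_STYLE_LINE = "- 문체는 간결하고 몰입감 있게, 장면 전환을 빠르게 하라."
--
-- def build_style(options):
--     if not options:
--         return DEFAULT_STYLE_LINE
--     present = set(options)
--     lines = [OPTION_TEXT[k] for k in OPTION_ORDER if k in present]
--     return "\n".join(lines) if lines else DEFAULT_STYLE_LINE
-- ===== Notes on version B (the rewrite author's own statement) =====
-- stated objective: simpler
-- what changed: B drops A's explicit first-occurrence dedup loop, the enumerate-built order dict and the keyed stable sort, and instead makes one pass over the canonical OPTION_ORDER list filtered by membership in a set of the input options.
import Mathlib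
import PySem

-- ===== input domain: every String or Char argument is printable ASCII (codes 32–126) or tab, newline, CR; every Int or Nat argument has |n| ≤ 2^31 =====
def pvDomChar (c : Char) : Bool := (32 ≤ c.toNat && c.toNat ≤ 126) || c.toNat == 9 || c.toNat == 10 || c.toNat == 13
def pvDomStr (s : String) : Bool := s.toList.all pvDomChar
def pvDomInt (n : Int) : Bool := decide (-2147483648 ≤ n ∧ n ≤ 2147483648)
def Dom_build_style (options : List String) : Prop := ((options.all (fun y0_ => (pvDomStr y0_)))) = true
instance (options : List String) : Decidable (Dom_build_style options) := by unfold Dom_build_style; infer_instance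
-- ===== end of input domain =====

-- B replaces A's dedup loop + order-dict + stable sort by one membership-filtered pass
-- over the canonical OPTION_ORDER list (objective: simpler); return values proved equal.


def OPTION_ORDER : List String :=
  ["DETAIL", "EMOTION_DEEP", "DIALOGUE_HEAVY", "INTENSE", "ADD_SIDE_CHAR", "WORLD_EXPAND", "TWIST"]

def OPTION_TEXT : PySem.Dict String String :=
  PySem.Dict.mk
  [("DETAIL", "- 장면 묘사를 풍부하게(시각/청각/후각/촉각 중 최소 2개), 인물의 미세한 표정·버릇·시선 처리를 자주 넣어라."),
   ("INTENSE", "- 갈등 강도를 높이고, 너에게 불리한 선택을 강요하는 상황을 넣어라. 단, 수위는 안전하게 유지하라."),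
   ("ADD_SIDE_CHAR", "- 새 인물 1~2명을 추가 등장시키고, 전개에 기능적 역할(조력/방해/미스터리)을 부여하라."),
   ("DIALOGUE_HEAVY", "- 대화 비중을 높여라(전체 분량 중 대화 50% 이상). 대사로 긴장과 정보가 전달되게 하라."),
   ("TWIST", "- 마지막 15% 구간에 자연스러운 반전 1개를 넣어라(억지 금지). 앞부분에 복선 1개를 반드시 심어라."),
   ("EMOTION_DEEP", "- 주인공의 감정 변화가 단계적으로 느껴지도록 내적 독백과 신체 반응(호흡/심장/손끝 등)을 배치하라."),
   ("WORLD_EXPAND", "- 세계관 단서(규칙/조직/사건의 흔적)를 1~2개 추가하되, 설명 과다는 피하고 장면 속에 녹여라.")]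

def DEFAULT_STYLE_LINE : String := "- 문체는 간결하고 몰입감 있게, 장면 전환을 빠르게 하라."

-- ===== PORT A =====
-- order = {k: i for i, k in enumerate(OPTION_ORDER)}
def pvOrderA : PySem.Dict String Int :=
  (PySem.List.enumerate OPTION_ORDER).foldl (fun d p => d.insert p.2 p.1) PySem.Dict.empty

-- the dedup loop: state is (uniq, seen)
def pvUniqA (options : List String) : List String × PySem.Set String :=
  options.foldl
    (fun st o => if PySem.Set.contains st.2 o then st else (st.1 ++ [o], PySem.Set.add st.2 o))
    ([], PySem.Set.empty)

def build_style (options : List String) : String :=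
  if options = [] then DEFAULT_STYLE_LINE
  else
    let uniq := PySem.List.sorted (pvUniqA options).1 (fun x => PySem.Dict.getD pvOrderA x 999)
    -- OPTION_TEXT[o] under the guard 'o in OPTION_TEXT' cannot raise; getD with a dummy default is exact here
    let lines := (uniq.filter (fun o => PySem.Dict.contains OPTION_TEXT o)).map
        (fun o => PySem.Dict.getD OPTION_TEXT o "")
    if lines = [] then DEFAULT_STYLE_LINE else PySem.Str.join "\n" lines

-- ===== PORT B =====
def build_style_alt (options : List String) : String :=
  if options = [] then DEFAULT_STYLE_LINE
  else
    let present := PySem.Set.ofList options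
    -- every k ∈ OPTION_ORDER is a key of OPTION_TEXT, so OPTION_TEXT[k] cannot raise; getD is exact here
    let lines := (OPTION_ORDER.filter (fun k => PySem.Set.contains present k)).map
        (fun k => PySem.Dict.getD OPTION_TEXT k "")
    if lines = [] then DEFAULT_STYLE_LINE else PySem.Str.join "\n" lines

-- ===== PRECONDITION & SPEC =====
def Spec_build_style (options : List String) (out : String) : Prop := out = build_style_alt options
instance (options : List String) (out : String) : Decidable (Spec_build_style options out) := by unfold Spec_build_style; infer_instance

-- ===== CLAIM (what is proved, stated in full; the proofs are below) =====
def Claim_equal_build_style : Prop := ∀ (options : List String), Dom_build_style options → Spec_build_style options (build_style options)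

-- ===== LEMMAS AND PROOFS =====

-- unfolding equation for insertBy with a comparison key
theorem insertBy_cons_eq {a : Type} (key : a -> Int) (x y : a) (ys : List a) :
    PySem.List.insertBy (fun p q => decide (key p < key q)) x (y :: ys) =
      if key x < key y then x :: y :: ys
      else y :: PySem.List.insertBy (fun p q => decide (key p < key q)) x ys := by
  by_cases h : key x < key y <;> simp [PySem.List.insertBy, h]

-- the dedup loop builds exactly set-of-list (first occurrences, in order)
theorem pvUniqA_loop (l : List String) (s : PySem.Set String) :
    l.foldl
      (fun st o => if PySem.Set.contains st.2 o then st else (st.1 ++ [o], PySem.Set.add st.2 o))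
      (s, s) = (l.foldl PySem.Set.add s, l.foldl PySem.Set.add s) := by
  induction l generalizing s with
  | nil => rfl
  | cons o l ih =>
    simp only [List.foldl_cons]
    have hstep : (if PySem.Set.contains s o then ((s : List String), s)
        else ((s : List String) ++ [o], PySem.Set.add s o)) = (PySem.Set.add s o, PySem.Set.add s o) := by
      by_cases h : o ∈ s <;> simp [PySem.Set.add, PySem.Set.contains, h]
    rw [hstep, ih]

theorem pvUniqA_fst (options : List String) : (pvUniqA options).1 = PySem.Set.ofList options := by
  unfold pvUniqA
  rw [show (([], PySem.Set.empty) : List String × PySem.Set String)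
      = ((PySem.Set.empty : PySem.Set String), (PySem.Set.empty : PySem.Set String)) from rfl,
    pvUniqA_loop, PySem.Set.ofList_eq_foldl]
  rfl

-- insertBy places x at the front when its key is below every key in the list
theorem insertBy_front {a : Type} (key : a -> Int) (x : a) (l : List a)
    (h : ∀ z ∈ l, key x < key z) :
    PySem.List.insertBy (fun p q => decide (key p < key q)) x l = x :: l := by
  cases l with
  | nil => rfl
  | cons y ys => rw [insertBy_cons_eq, if_pos (h y (by simp))]

-- filter commutes with insertBy into a key-sorted list (kept element)
theorem filter_insertBy_pos {a : Type} (key : a -> Int) (p : a -> Bool) (x : a) (acc : List a)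
    (hs : acc.Pairwise (fun u v => key u ≤ key v)) (hx : p x = true) :
    (PySem.List.insertBy (fun u v => decide (key u < key v)) x acc).filter p
      = PySem.List.insertBy (fun u v => decide (key u < key v)) x (acc.filter p) := by
  induction acc with
  | nil => simp [PySem.List.insertBy, hx]
  | cons y ys ih =>
    rcases List.pairwise_cons.mp hs with ⟨hy, hys⟩
    by_cases hlt : key x < key y
    · rw [insertBy_cons_eq, if_pos hlt]
      by_cases hpy : p y = true
      · simp [hx, hpy, insertBy_cons_eq, hlt]
      · rw [List.filter_cons_of_pos hx, List.filter_cons_of_neg (by simp [hpy])]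
        exact (insertBy_front key x _ (fun z hz =>
          lt_of_lt_of_le hlt (hy z (List.mem_of_mem_filter hz)))).symm
    · rw [insertBy_cons_eq, if_neg hlt, List.filter_cons, List.filter_cons]
      by_cases hpy : p y = true
      · simp [hpy, ih hys, insertBy_cons_eq, hlt]
      · simp [hpy, ih hys]

-- filter drops a discarded inserted element
theorem filter_insertBy_neg {a : Type} (key : a -> Int) (p : a -> Bool) (x : a) (acc : List a)
    (hx : p x = false) :
    (PySem.List.insertBy (fun u v => decide (key u < key v)) x acc).filter p = acc.filter p := by
  induction acc with
  | nil => simp [PySem.List.insertBy, hx]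
  | cons y ys ih =>
    by_cases hlt : key x < key y
    · rw [insertBy_cons_eq, if_pos hlt, List.filter_cons_of_neg (by simp [hx])]
    · rw [insertBy_cons_eq, if_neg hlt, List.filter_cons, List.filter_cons]
      by_cases hpy : p y = true
      · simp [hpy, ih]
      · simp [hpy, ih]

-- insertBy preserves key-sortedness
theorem insertBy_pairwise {a : Type} (key : a -> Int) (x : a) (acc : List a)
    (hs : acc.Pairwise (fun u v => key u ≤ key v)) :
    (PySem.List.insertBy (fun u v => decide (key u < key v)) x acc).Pairwise
      (fun u v => key u ≤ key v) := by
  induction acc with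
  | nil => simp [PySem.List.insertBy]
  | cons y ys ih =>
    rcases List.pairwise_cons.mp hs with ⟨hy, hys⟩
    by_cases hlt : key x < key y
    · rw [insertBy_cons_eq, if_pos hlt]
      refine List.pairwise_cons.mpr ⟨?_, hs⟩
      intro z hz
      rcases List.mem_cons.mp hz with rfl | hz
      · exact le_of_lt hlt
      · exact le_trans (le_of_lt hlt) (hy z hz)
    · rw [insertBy_cons_eq, if_neg hlt]
      refine List.pairwise_cons.mpr ⟨?_, ih hys⟩
      intro z hz
      rcases (PySem.List.mem_insertBy _ x z ys).mp hz with rfl | hz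
      · exact le_of_not_gt (by simpa using hlt)
      · exact hy z hz

-- filter commutes with the whole insertion-sort fold
theorem filter_foldl_insertBy {a : Type} (key : a -> Int) (p : a -> Bool) (l acc : List a)
    (hs : acc.Pairwise (fun u v => key u ≤ key v)) :
    (l.foldl (fun acc x => PySem.List.insertBy (fun u v => decide (key u < key v)) x acc) acc).filter p
      = (l.filter p).foldl
          (fun acc x => PySem.List.insertBy (fun u v => decide (key u < key v)) x acc)
          (acc.filter p) := by
  induction l generalizing acc with
  | nil => rfl
  | cons x l ih =>
    simp only [List.foldl_cons, List.filter_cons]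
    by_cases hx : p x = true
    · rw [if_pos hx, List.foldl_cons, ih _ (insertBy_pairwise key x acc hs),
        filter_insertBy_pos key p x acc hs hx]
    · rw [if_neg (by simp [hx]), ih _ (insertBy_pairwise key x acc hs),
        filter_insertBy_neg key p x acc (by simpa using hx)]

-- filtering a stable keyed sort = sorting the filtered list
theorem filter_sorted {a : Type} (key : a -> Int) (p : a -> Bool) (xs : List a) :
    (PySem.List.sorted xs key).filter p = PySem.List.sorted (xs.filter p) key := by
  rw [PySem.List.sorted_eq_foldl_insertBy, PySem.List.sorted_eq_foldl_insertBy]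
  exact filter_foldl_insertBy key p xs [] (by simp)

-- membership in OPTION_TEXT is exactly membership in OPTION_ORDER
theorem contains_OPTION_TEXT (x : String) :
    PySem.Dict.contains OPTION_TEXT x = true ↔ x ∈ OPTION_ORDER := by
  constructor
  · intro h
    rcases List.any_eq_true.mp h with ⟨kv, hkv, hb⟩
    have hx : kv.1 = x := by simpa using hb
    have h1 : x ∈ OPTION_TEXT.items.map Prod.fst := List.mem_map.mpr ⟨kv, hkv, hx⟩
    simp only [OPTION_TEXT, List.map_cons, List.map_nil, List.mem_cons, List.not_mem_nil,
      or_false] at h1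
    simp only [OPTION_ORDER, List.mem_cons, List.not_mem_nil, or_false]
    tauto
  · intro h
    simp only [OPTION_ORDER, List.mem_cons, List.not_mem_nil, or_false] at h
    rcases h with rfl | rfl | rfl | rfl | rfl | rfl | rfl <;> decide

-- the list A ends up mapping over equals the list B maps over
theorem filtered_eq (options : List String) :
    ((PySem.List.sorted (PySem.Set.ofList options) (fun x => PySem.Dict.getD pvOrderA x 999)).filter
        (fun o => PySem.Dict.contains OPTION_TEXT o))
      = OPTION_ORDER.filter (fun k => PySem.Set.contains (PySem.Set.ofList options) k) := by
  rw [filter_sorted]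
  apply PySem.List.sorted_eq_of_perm_of_pairwise_lt
  · apply List.perm_of_nodup_nodup_toFinset_eq
    · exact List.Nodup.filter _ (by decide)
    · exact List.Nodup.filter _ (PySem.Set.nodup_ofList options)
    · apply Finset.ext
      intro x
      simp only [List.mem_toFinset, List.mem_filter]
      constructor
      · rintro ⟨hxO, hcont⟩
        exact ⟨(PySem.Set.contains_iff _ x).mp hcont, (contains_OPTION_TEXT x).mpr hxO⟩
      · rintro ⟨hxU, hp⟩
        exact ⟨(contains_OPTION_TEXT x).mp hp, (PySem.Set.contains_iff _ x).mpr hxU⟩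
  · exact List.Pairwise.sublist List.filter_sublist (by decide)

-- ===== VERDICT (by name: the statement is the Claim_ definition above) =====
theorem build_style_spec : Claim_equal_build_style := by
  intro options _
  unfold Spec_build_style build_style build_style_alt
  by_cases h : options = []
  · simp [h]
  · simp only [h, if_false]
    rw [pvUniqA_fst, filtered_eq]
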